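-- pv_equiv track=rewrite | github.com/vlad-marlo/algorithms | school/ege/vars/25021990/26.py | solution
-- ===== SOURCE A (Python) =====
-- def solution(data: list[int]) -> tuple[int, int]:
--     data.sort(reverse=True)
--     count = len(data) // 3
--     sm_final = sum(data)
--     sm_before = sm_final
--     for i in range(0, (len(data) // 3) * 3, 3):
--         sm_final -= min(data[i:i+3])
--     for i in range(count):
--         sm_before -= data[i]
--     return sm_before, sm_final
-- ===== SOURCE B (Python) =====
-- def _keep(xs):
--     # add the two largest of each complete descending triple, then the leftover tail
--     total = 0
--     i = 0
--     while len(xs) - i >= 3: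
--         total += xs[i] + xs[i + 1]
--         i += 3
--     return total + sum(xs[i:])
--
--
-- def solution(data: list[int]) -> tuple[int, int]:
--     data.sort(reverse=True)
--     count = len(data) // 3
--     return sum(data[count:]), _keep(data)
-- ===== Notes on version B (the rewrite author's own statement) =====
-- stated objective: simpler
-- what changed: B sums the retained elements directly (the tail beyond the top third, and the two largest of each descending triple via chunk recursion) instead of A's total-minus-removed subtraction loops over index ranges with slices and min().
import Mathlib
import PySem

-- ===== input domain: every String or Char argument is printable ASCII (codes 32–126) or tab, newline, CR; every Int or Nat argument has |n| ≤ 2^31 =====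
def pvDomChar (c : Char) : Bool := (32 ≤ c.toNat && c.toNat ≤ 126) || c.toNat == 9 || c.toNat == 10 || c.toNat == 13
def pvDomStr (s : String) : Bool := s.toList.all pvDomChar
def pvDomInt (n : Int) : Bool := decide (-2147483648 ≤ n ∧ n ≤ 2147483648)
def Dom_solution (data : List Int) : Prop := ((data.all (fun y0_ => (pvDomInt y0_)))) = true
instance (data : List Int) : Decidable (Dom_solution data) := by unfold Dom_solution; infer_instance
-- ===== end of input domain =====

-- B sums the retained elements directly (tail beyond the top third; two largest of each
-- descending triple by chunk recursion) instead of A's total-minus-removed subtraction loops.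
-- Python A (and B) sort `data` in place; the equivalence proved here is about the return value.

-- ===== PORT A =====
def solution (data : List Int) : Int × Int :=
  let s := PySem.List.sorted data (fun x => x) true
  let count : Int := PySem.Int.floordiv (s.length : Int) 3
  let sm : Int := s.sum
  -- min(data[i:i+3]): in this loop the slice always has 3 elements, so min? is never none; getD 0 is exact
  let smFinal := (PySem.List.pyRange 0 (PySem.Int.floordiv (s.length : Int) 3 * 3) 3).foldl
      (fun acc i => acc - (PySem.List.min? (PySem.List.slice s (some i) (some (i + 3))) (fun x => x)).getD 0) sm
  -- data[i] for i in range(count): the index is always in range; pyGetD with default 0 is exact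
  let smBefore := (PySem.List.pyRange 0 count 1).foldl (fun acc i => acc - PySem.List.pyGetD s i 0) sm
  (smBefore, smFinal)

-- ===== PORT B =====
-- _keep: xs[0] + xs[1] + _keep(xs[3:]) while len(xs) >= 3, else sum(xs)
def keepTop2 : List Int → Int
  | a :: b :: _ :: t => a + b + keepTop2 t
  | t => t.sum

def solution_alt (data : List Int) : Int × Int :=
  let s := PySem.List.sorted data (fun x => x) true
  let count : Int := PySem.Int.floordiv (s.length : Int) 3
  ((PySem.List.slice s (some count) none).sum, keepTop2 s)

-- ===== PRECONDITION & SPEC =====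
def Spec_solution (data : List Int) (out : Int × Int) : Prop := out = solution_alt data
instance (data : List Int) (out : Int × Int) : Decidable (Spec_solution data out) := by unfold Spec_solution; infer_instance

-- ===== CLAIM (what is proved, stated in full; the proofs are below) =====
def Claim_equal_solution : Prop := ∀ (data : List Int), Dom_solution data → Spec_solution data (solution data)

-- ===== LEMMAS AND PROOFS =====

-- a fold that subtracts g of each element is the initial value minus the sum (via PySem.List.foldl_add)
theorem foldl_sub_eq {β : Type} (l : List β) (g : β → Int) (a : Int) :
    l.foldl (fun acc x => acc - g x) a = a - (l.map g).sum := by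
  have h := PySem.List.foldl_add l (fun x => -(g x)) a
  have hn : (l.map (fun x => -(g x))).sum = -((l.map g).sum) := by
    simpa [List.map_map, Function.comp] using (List.sum_neg (l.map g)).symm
  simp only [sub_eq_add_neg]
  rw [h, hn]

-- the sm_before loop: subtracting s[i] for i in range(c) leaves init minus the top-c sum
theorem before_loop (s : List Int) (c : Nat) (hc : c ≤ s.length) (init : Int) :
    (PySem.List.pyRange 0 (c : Int) 1).foldl (fun acc i => acc - PySem.List.pyGetD s i 0) init
      = init - (s.take c).sum := by
  induction c generalizing init with
  | zero => simp [PySem.List.pyRange_one_eq_nil]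
  | succ c ih =>
    have hlt : c < s.length := hc
    have hstep : ((c + 1 : Nat) : Int) = (c : Int) + 1 := by push_cast; ring
    rw [hstep, PySem.List.pyRange_one_succ_right (by positivity), List.foldl_append,
        ih (Nat.le_of_lt hlt)]
    have hget : PySem.List.pyGetD s (c : Int) 0 = s[c] := by
      simp [PySem.List.pyGetD_natCast, List.getD, hlt]
    have htake : (s.take (c + 1)).sum = (s.take c).sum + s[c] := List.sum_take_succ s c hlt
    simp only [List.foldl_cons, List.foldl_nil, hget, htake]
    ring

-- range(0, 3*k, 3) is the triple starts 0,3,…,3(k-1)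
theorem pyRange_three (k : Nat) :
    PySem.List.pyRange 0 (3 * (k : Int)) 3 = (List.range k).map (fun j : Nat => 3 * (j : Int)) := by
  rw [PySem.List.pyRange_of_pos 0 (3 * (k : Int)) (by norm_num)]
  rcases Nat.eq_zero_or_pos k with hk | hk
  · simp [hk]
  · have h1 : (0 : Int) < 3 * (k : Int) := by positivity
    rw [if_pos h1]
    have h2 : ((3 * (k : Int) - 0 + 3 - 1) / 3).toNat = k := by omega
    rw [h2]
    exact List.map_congr_left (fun j _ => by ring)

-- the slice data[3j : 3j+3] is the j-th triple
theorem slice_triple (s : List Int) (j : Nat) :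
    PySem.List.slice s (some (3 * (j : Int))) (some (3 * (j : Int) + 3))
      = (s.drop (3 * j)).take 3 := by
  have h1 : (3 * (j : Int)) = ((3 * j : Nat) : Int) := by push_cast; ring
  have h2 : ((3 * j : Nat) : Int) + 3 = ((3 * j : Nat) : Int) + ((3 : Nat) : Int) := by norm_num
  rw [h1, h2, PySem.List.slice_natCast_add s (3 * j) 3]

-- core: on a descending list, total minus the per-triple minima is the sum of the kept elements
theorem minima_keep (s : List Int) (hs : s.Pairwise (fun a b => b ≤ a)) :
    s.sum - ((List.range (s.length / 3)).map
        (fun j => (PySem.List.min? ((s.drop (3 * j)).take 3) (fun x => x)).getD 0)).sum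
      = keepTop2 s := by
  induction s using keepTop2.induct with
  | case1 a b c t ih =>
    have hlen : (a :: b :: c :: t).length / 3 = t.length / 3 + 1 := by
      simp [List.length_cons]; omega
    rw [hlen, List.range_succ_eq_map]
    have hdrop : ∀ j : Nat, List.drop (3 * (j + 1)) (a :: b :: c :: t) = List.drop (3 * j) t := by
      intro j
      have : 3 * (j + 1) = (3 * j) + 1 + 1 + 1 := by ring
      rw [this]
      rfl
    have hmap : (List.map Nat.succ (List.range (t.length / 3))).map
          (fun j => (PySem.List.min? ((List.drop (3 * j) (a :: b :: c :: t)).take 3) (fun x => x)).getD 0)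
        = (List.range (t.length / 3)).map
          (fun j => (PySem.List.min? ((List.drop (3 * j) t).take 3) (fun x => x)).getD 0) := by
      rw [List.map_map]
      refine List.map_congr_left (fun j _ => ?_)
      simp [Function.comp, hdrop j]
    -- the head triple's minimum is c
    rcases List.pairwise_cons.mp hs with ⟨ha, hs'⟩
    rcases List.pairwise_cons.mp hs' with ⟨hb, hs''⟩
    have hba : b ≤ a := ha b (by simp)
    have hcb : c ≤ b := hb c (by simp)
    have hmin : (PySem.List.min? [a, b, c] (fun x => x)).getD 0 = c := by
      rw [PySem.List.min?_id_cons]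
      have : min (min a b) c = c := by
        rcases le_total a b with h | h <;> simp [min_def] <;> omega
      simp [List.foldl, this]
    have ih' := ih (hs''.sublist (List.sublist_cons_self c t))
    have hk : keepTop2 (a :: b :: c :: t) = a + b + keepTop2 t := rfl
    simp only [List.map_cons, List.sum_cons, hmap, Nat.mul_zero, List.drop_zero,
      List.take_succ_cons, List.take_zero, hmin, hk]
    omega
  | case2 t h1 =>
    -- t has fewer than 3 elements: len/3 = 0, no triples removed
    have hlt : t.length < 3 := by
      match t, h1 with
      | [], _ => simp
      | [_], _ => simp
      | [_, _], _ => simp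
      | a :: b :: c :: t', h => exact absurd rfl (h a b c t')
    have hdiv : t.length / 3 = 0 := Nat.div_eq_of_lt hlt
    rw [hdiv]
    have hkeep : keepTop2 t = t.sum := by
      match t, h1 with
      | [], _ => rfl
      | [_], _ => rfl
      | [_, _], _ => rfl
      | a :: b :: c :: t', h => exact absurd rfl (h a b c t')
    simp [hkeep]

-- ===== VERDICT (by name: the statement is the Claim_ definition above) =====
theorem solution_spec : Claim_equal_solution := by
  intro data _
  unfold Spec_solution solution solution_alt
  set s := PySem.List.sorted data (fun x => x) true with hs
  have hcount : PySem.Int.floordiv (s.length : Int) 3 = ((s.length / 3 : Nat) : Int) := by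
    exact_mod_cast PySem.Int.floordiv_natCast s.length 3
  refine Prod.ext ?_ ?_
  · -- first component: sm_before = sum of the tail beyond the top third
    show (PySem.List.pyRange 0 (PySem.Int.floordiv (s.length : Int) 3) 1).foldl
        (fun acc i => acc - PySem.List.pyGetD s i 0) s.sum
      = (PySem.List.slice s (some (PySem.Int.floordiv (s.length : Int) 3)) none).sum
    rw [hcount, before_loop s (s.length / 3) (Nat.div_le_self _ _) s.sum,
        PySem.List.slice_from_natCast]
    have h := List.take_append_drop (s.length / 3) s
    have hsum : (s.take (s.length / 3)).sum + (s.drop (s.length / 3)).sum = s.sum := by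
      conv_rhs => rw [← h]
      rw [List.sum_append]
    omega
  · -- second component: sm_final = kept elements of each triple
    show (PySem.List.pyRange 0 (PySem.Int.floordiv (s.length : Int) 3 * 3) 3).foldl
        (fun acc i => acc - (PySem.List.min? (PySem.List.slice s (some i) (some (i + 3))) (fun x => x)).getD 0) s.sum
      = keepTop2 s
    have hb : PySem.Int.floordiv (s.length : Int) 3 * 3 = 3 * ((s.length / 3 : Nat) : Int) := by
      rw [hcount]; ring
    rw [hb, pyRange_three, foldl_sub_eq, List.map_map]
    have hmap : (List.range (s.length / 3)).map
          ((fun i => (PySem.List.min? (PySem.List.slice s (some i) (some (i + 3))) (fun x => x)).getD 0)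
            ∘ (fun j : Nat => 3 * (j : Int)))
        = (List.range (s.length / 3)).map
          (fun j => (PySem.List.min? ((s.drop (3 * j)).take 3) (fun x => x)).getD 0) := by
      refine List.map_congr_left (fun j _ => ?_)
      simp [Function.comp, slice_triple s j]
    rw [hmap]
    exact minima_keep s (PySem.List.sorted_pairwise_rev data (fun x => x))
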